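-- pv_equiv track=rewrite | github.com/Grayfox96/FFX-RNG-tracker | ffx_rng_tracker/ui_abstract/base_tracker.py | get_paddings
-- ===== SOURCE A (Python) =====
-- from collections import defaultdict
--
-- def get_paddings(
--                  split_lines: list[list[str]],
--                  ) -> dict[str, dict[int, int]]:
--     paddings: dict[str, dict[int, int]] = defaultdict(dict)
--     for event_name, *line_parts in split_lines:
--         if not line_parts:
--             continue
--         event_paddings = paddings[event_name]
--         for i, line_part in enumerate(line_parts):
--             event_paddings[i] = max(
--                 event_paddings.get(i, 0), len(line_part))
--     return paddings
-- ===== SOURCE B (Python) =====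
-- from collections import defaultdict
-- from itertools import zip_longest
--
-- def get_paddings(
--                  split_lines: list[list[str]],
--                  ) -> dict[str, dict[int, int]]:
--     # Group rows by event name, then compute column-wise maxima by transposing.
--     groups: dict[str, list[list[str]]] = defaultdict(list)
--     for row in split_lines:
--         if len(row) > 1:
--             groups[row[0]].append(row[1:])
--     paddings: dict[str, dict[int, int]] = defaultdict(dict)
--     for event_name, rows in groups.items():
--         paddings[event_name] = {
--             i: max(len(part) for part in column)
--             for i, column in enumerate(zip_longest(*rows, fillvalue=''))
--         }
--     return paddings
-- ===== Notes on version B (the rewrite author's own statement) =====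
-- stated objective: alternative
-- what changed: A accumulates per-column maxima row by row into nested dicts; B first groups rows by event name, then transposes each group with zip_longest and takes the max part length per column in one columnar pass.
import Mathlib
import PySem

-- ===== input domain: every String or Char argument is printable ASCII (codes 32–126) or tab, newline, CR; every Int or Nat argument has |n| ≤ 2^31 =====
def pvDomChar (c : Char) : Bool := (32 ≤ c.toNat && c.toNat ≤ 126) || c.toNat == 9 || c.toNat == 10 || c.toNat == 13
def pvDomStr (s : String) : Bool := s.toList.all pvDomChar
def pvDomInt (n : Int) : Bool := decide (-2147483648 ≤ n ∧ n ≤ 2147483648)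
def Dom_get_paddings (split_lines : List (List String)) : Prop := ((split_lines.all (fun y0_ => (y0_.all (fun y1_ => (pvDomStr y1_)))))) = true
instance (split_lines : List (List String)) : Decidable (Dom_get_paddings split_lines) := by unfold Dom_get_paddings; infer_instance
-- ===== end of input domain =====

-- B groups rows by event name and takes per-column maxima over the transposed group
-- (zip_longest), instead of A's row-by-row accumulating max; same cost, different traversal.

-- ===== PORT A =====
-- inner loop of A: for i, line_part in enumerate(line_parts): event_paddings[i] = max(event_paddings.get(i, 0), len(line_part))
def innerLoopA (ep : PySem.Dict Int Int) (line_parts : List String) : PySem.Dict Int Int :=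
  (PySem.List.enumerate line_parts).foldl
    (fun ep p => ep.insert p.1 (max (ep.getD p.1 0) (PySem.Str.len p.2))) ep

def get_paddings (split_lines : List (List String)) : List (String × List (Int × Int)) :=
  let paddings : PySem.Dict String (PySem.Dict Int Int) :=
    split_lines.foldl
      (fun paddings row =>
        match row with
        | [] => paddings            -- Python raises ValueError here (unpacking); excluded by Pre_
        | event_name :: line_parts =>
          if line_parts.isEmpty then paddings
          else paddings.insert event_name
                 (innerLoopA (paddings.getD event_name PySem.Dict.empty) line_parts))
      PySem.Dict.empty
  paddings.items.map (fun p => (p.1, p.2.items))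

-- ===== PORT B =====
-- zip_longest(*rows, fillvalue='') produces max-row-length columns; column i is
-- (r[i] if i < len(r) else '' for r in rows); max over the nonempty column is ported
-- as foldl max 0 (exact: lengths are ≥ 0 and the column is nonempty).
def colMax (rows : List (List String)) : List (Int × Int) :=
  (List.range (rows.foldl (fun acc r => max acc r.length) 0)).map
    (fun (i : Nat) => ((i : Int), (rows.map (fun r => PySem.Str.len (r.getD i ""))).foldl max 0))

def get_paddings_alt (split_lines : List (List String)) : List (String × List (Int × Int)) :=
  let groups : PySem.Dict String (List (List String)) :=
    split_lines.foldl
      (fun g row =>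
        match row with
        | event_name :: part :: rest => g.insert event_name (g.getD event_name [] ++ [part :: rest])
        | _ => g)
      PySem.Dict.empty
  groups.items.map (fun p => (p.1, colMax p.2))

-- ===== PRECONDITION & SPEC =====
-- Pre_ excludes exactly the inputs containing an empty row, on which Python A raises
-- ValueError during tuple unpacking.
def Pre_get_paddings (split_lines : List (List String)) : Prop :=
  ∀ row ∈ split_lines, row ≠ []
instance (split_lines : List (List String)) : Decidable (Pre_get_paddings split_lines) := by
  unfold Pre_get_paddings; infer_instance

def pvWitness_get_paddings : List (List String) := [["e", "ab"], ["e", "a", "xyz"], ["f"]]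

def Spec_get_paddings (split_lines : List (List String)) (out : List (String × List (Int × Int))) : Prop := out = get_paddings_alt split_lines
instance (split_lines : List (List String)) (out : List (String × List (Int × Int))) : Decidable (Spec_get_paddings split_lines out) := by unfold Spec_get_paddings; infer_instance

-- ===== CLAIM (what is proved, stated in full; the proofs are below) =====
def Claim_equal_get_paddings : Prop := ∀ (split_lines : List (List String)), Dom_get_paddings split_lines → Pre_get_paddings split_lines → Spec_get_paddings split_lines (get_paddings split_lines)

-- ===== LEMMAS AND PROOFS =====

-- canonical inner-dict item list: keys 0..n-1 in order
def canon (f : Nat → Int) (n : Nat) : List (Int × Int) :=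
  (List.range n).map (fun (i : Nat) => ((i : Int), f i))

-- column max and column count of B, as functions
def colF (rows : List (List String)) (i : Nat) : Int :=
  (rows.map (fun r => PySem.Str.len (r.getD i ""))).foldl max 0

def nCols (rows : List (List String)) : Nat :=
  rows.foldl (fun acc r => max acc r.length) 0

lemma colMax_eq_canon (rows : List (List String)) : colMax rows = canon (colF rows) (nCols rows) := rfl

lemma canon_congr {f g : Nat → Int} {n : Nat} (h : ∀ i < n, f i = g i) : canon f n = canon g n := by
  unfold canon
  exact List.map_congr_left fun i hi => by simp [h i (List.mem_range.mp hi)]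

lemma keys_canon (ep : PySem.Dict Int Int) (f : Nat → Int) (n : Nat) (h : ep.items = canon f n) :
    ep.keys = (List.range n).map (fun i => Int.ofNat i) := by
  simp only [PySem.Dict.keys, h, canon, List.map_map]
  rfl

lemma nodup_keys_canon (ep : PySem.Dict Int Int) (f : Nat → Int) (n : Nat) (h : ep.items = canon f n) :
    ep.keys.Nodup := by
  rw [keys_canon ep f n h]
  exact List.Nodup.map (fun a b hab => Int.ofNat_inj.mp hab) List.nodup_range

lemma contains_canon (ep : PySem.Dict Int Int) (f : Nat → Int) (n : Nat) (h : ep.items = canon f n)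
    (j : Nat) : ep.contains (j : Int) = decide (j < n) := by
  rw [PySem.Dict.contains_eq_decide_mem_keys, keys_canon ep f n h]
  simp [List.mem_map, List.mem_range]

lemma getD_canon (ep : PySem.Dict Int Int) (f : Nat → Int) (n : Nat) (h : ep.items = canon f n)
    (j : Nat) : ep.getD (j : Int) 0 = if j < n then f j else 0 := by
  by_cases hj : j < n
  · have hmem : ((j : Int), f j) ∈ ep.items := by
      rw [h]; exact List.mem_map.mpr ⟨j, List.mem_range.mpr hj, rfl⟩
    rw [PySem.Dict.getD_of_mem_items ep hmem (nodup_keys_canon ep f n h)]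
    simp [hj]
  · rw [PySem.Dict.getD_of_not_contains ep 0 (by rw [contains_canon ep f n h]; simpa using hj)]
    simp [hj]

lemma insert_canon (ep : PySem.Dict Int Int) (f : Nat → Int) (n : Nat) (h : ep.items = canon f n)
    (j : Nat) (hj : j ≤ n) (v : Int) :
    (ep.insert (j : Int) v).items = canon (fun i => if i = j then v else f i) (max n (j + 1)) := by
  by_cases hlt : j < n
  · rw [PySem.Dict.items_insert_of_contains ep v (by rw [contains_canon ep f n h]; simpa using hlt)]
    rw [h]
    unfold canon
    rw [List.map_map]
    have hmax : max n (j + 1) = n := by omega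
    rw [hmax]
    refine List.map_congr_left fun i hi => ?_
    by_cases hij : i = j
    · subst hij; simp
    · simp only [Function.comp]
      simp [hij, Nat.cast_inj]
  · have hjn : n = j := by omega
    subst hjn
    rw [PySem.Dict.items_insert_of_not_contains ep v (by rw [contains_canon ep f n h]; simp)]
    rw [h]
    have hmax : max n (n + 1) = n + 1 := by omega
    rw [hmax]
    unfold canon
    rw [List.range_succ, List.map_append]
    congr 1
    · refine List.map_congr_left fun i hi => ?_
      have : i ≠ n := by have := List.mem_range.mp hi; omega
      simp [this]
    · simp

lemma innerLoopA_canon (parts : List String) (ep : PySem.Dict Int Int) (f : Nat → Int) (n : Nat)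
    (h : ep.items = canon f n) (hf : ∀ i, 0 ≤ f i) :
    (innerLoopA ep parts).items =
      canon (fun i => max (if i < n then f i else 0) (PySem.Str.len (parts.getD i "")))
        (max n parts.length) := by
  induction parts using List.reverseRecOn with
  | nil =>
      show ep.items = _
      rw [h]
      have hsz : max n (List.length ([] : List String)) = n := by simp
      rw [hsz]
      refine canon_congr fun i hi => ?_
      rw [if_pos hi]
      have : (([] : List String).getD i "") = "" := by simp
      rw [this]
      have hl : PySem.Str.len "" = 0 := by decide
      rw [hl]
      exact (max_eq_left (hf i)).symm
  | append_singleton ps p ih =>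
      show ((PySem.List.enumerate (ps ++ [p]) 0).foldl
        (fun ep q => ep.insert q.1 (max (ep.getD q.1 0) (PySem.Str.len q.2))) ep).items = _
      rw [PySem.List.enumerate_append, List.foldl_append]
      have hstep : (PySem.List.enumerate ps 0).foldl
          (fun ep q => ep.insert q.1 (max (ep.getD q.1 0) (PySem.Str.len q.2))) ep
          = innerLoopA ep ps := rfl
      rw [hstep]
      have hL0 : (0 : Int) + (ps.length : Int) = (ps.length : Int) := by omega
      rw [PySem.List.enumerate_cons, PySem.List.enumerate_nil, hL0]
      rw [List.foldl_cons, List.foldl_nil]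
      rw [getD_canon _ _ _ ih ps.length]
      rw [insert_canon _ _ _ ih ps.length (Nat.le_max_right n ps.length) _]
      have hsz : max (max n ps.length) (ps.length + 1) = max n (ps.length + 1) := by omega
      rw [hsz]
      have hsz2 : (ps ++ [p]).length = ps.length + 1 := by simp
      rw [hsz2]
      refine canon_congr fun i hi => ?_
      by_cases hij : i = ps.length
      · subst hij
        have hget : ((ps ++ [p]).getD ps.length "") = p := by
          rw [List.getD_append_right ps [p] "" ps.length (le_refl _)]
          simp
        rw [if_pos rfl, hget]
        have hget2 : (ps.getD ps.length "") = "" := List.getD_eq_default _ _ (le_refl _)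
        by_cases hn : ps.length < n
        · have hN : ps.length < max n ps.length := by omega
          rw [if_pos hN, if_pos hn, hget2]
          have hl : PySem.Str.len "" = 0 := by decide
          rw [hl, max_eq_left (hf ps.length)]
        · have hN : ¬ ps.length < max n ps.length := by omega
          rw [if_neg hN, if_neg hn]
      · rw [if_neg hij]
        by_cases hlt : i < ps.length
        · rw [List.getD_append ps [p] "" i hlt]
        · have h1 : ps.length ≤ i := by omega
          have h2 : (ps ++ [p]).length ≤ i := by simp; omega
          rw [List.getD_eq_default _ _ h1, List.getD_eq_default _ _ h2]

lemma colF_nonneg (rows : List (List String)) (i : Nat) : 0 ≤ colF rows i := by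
  exact (PySem.List.le_foldl_max _ 0).1

lemma colF_eq_zero_of_ge (rows : List (List String)) (i : Nat) (hi : nCols rows ≤ i) :
    colF rows i = 0 := by
  have hall : ∀ x ∈ rows.map (fun r => PySem.Str.len (r.getD i "")), x ≤ 0 := by
    intro x hx
    obtain ⟨r, hr, rfl⟩ := List.mem_map.mp hx
    have hlen : r.length ≤ i :=
      le_trans ((PySem.List.le_foldl_max_nat rows List.length 0).2 r hr) hi
    rw [List.getD_eq_default _ _ hlen]
    simp [PySem.Str.len]
  rcases PySem.List.foldl_max_mem (rows.map (fun r => PySem.Str.len (r.getD i ""))) 0 with h0 | hmem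
  · exact h0
  · exact le_antisymm (hall _ hmem) (colF_nonneg rows i)

lemma nCols_append (rows : List (List String)) (parts : List String) :
    nCols (rows ++ [parts]) = max (nCols rows) parts.length := by
  simp [nCols, List.foldl_append]

lemma colF_append (rows : List (List String)) (parts : List String) (i : Nat) :
    colF (rows ++ [parts]) i = max (colF rows i) (PySem.Str.len (parts.getD i "")) := by
  simp [colF, List.map_append, List.foldl_append]

-- one A-row step on a canonical inner dict equals appending the row to the group
lemma step_value (ep : PySem.Dict Int Int) (rows : List (List String)) (parts : List String)
    (h : ep.items = colMax rows) :
    (innerLoopA ep parts).items = colMax (rows ++ [parts]) := by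
  rw [colMax_eq_canon] at h
  rw [innerLoopA_canon parts ep (colF rows) (nCols rows) h (colF_nonneg rows)]
  rw [colMax_eq_canon, nCols_append]
  refine canon_congr fun i hi => ?_
  rw [colF_append]
  by_cases hn : i < nCols rows
  · simp [hn]
  · rw [colF_eq_zero_of_ge rows i (by omega)]
    simp [hn]

def RelAG (d : PySem.Dict String (PySem.Dict Int Int)) (g : PySem.Dict String (List (List String))) : Prop :=
  d.items.map (fun p => (p.1, p.2.items)) = g.items.map (fun p => (p.1, colMax p.2))

lemma rel_replace (la : List (String × PySem.Dict Int Int)) (lb : List (String × List (List String)))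
    (h : la.map (fun p => (p.1, p.2.items)) = lb.map (fun p => (p.1, colMax p.2)))
    (name : String) (v : PySem.Dict Int Int) (w : List (List String)) (hv : v.items = colMax w) :
    (la.map (fun p => if p.1 == name then (name, v) else p)).map (fun p => (p.1, p.2.items))
      = (lb.map (fun p => if p.1 == name then (name, w) else p)).map (fun p => (p.1, colMax p.2)) := by
  induction la generalizing lb with
  | nil =>
      cases lb with
      | nil => simp
      | cons b tb => simp at h
  | cons a ta ihla =>
      cases lb with
      | nil => simp at h
      | cons b tb =>
          simp only [List.map_cons, List.cons.injEq] at h ⊢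
          obtain ⟨hhead, htail⟩ := h
          have hk : a.1 = b.1 := congrArg Prod.fst hhead
          constructor
          · by_cases hname : a.1 = name
            · simp [hname, hk ▸ hname, hv]
            · have hbname : ¬ b.1 = name := hk ▸ hname
              simp only [beq_iff_eq, hname, hbname, if_false]
              exact hhead
          · exact ihla tb htail

lemma rel_keys (d : PySem.Dict String (PySem.Dict Int Int)) (g : PySem.Dict String (List (List String)))
    (h : RelAG d g) : d.keys = g.keys := by
  have h2 := congrArg (List.map Prod.fst) h
  simpa [List.map_map, PySem.Dict.keys, Function.comp] using h2

lemma main_invariant (sl : List (List String)) :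
    ∀ (d : PySem.Dict String (PySem.Dict Int Int)) (g : PySem.Dict String (List (List String))),
      RelAG d g → d.keys.Nodup → g.keys.Nodup →
      RelAG (sl.foldl (fun paddings row =>
            match row with
            | [] => paddings
            | event_name :: line_parts =>
              if line_parts.isEmpty then paddings
              else paddings.insert event_name
                     (innerLoopA (paddings.getD event_name PySem.Dict.empty) line_parts)) d)
          (sl.foldl (fun g row =>
            match row with
            | event_name :: part :: rest => g.insert event_name (g.getD event_name [] ++ [part :: rest])
            | _ => g) g) := by
  induction sl with
  | nil => intro d g hrel _ _; exact hrel
  | cons row sl ih =>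
      intro d g hrel hd hg
      rw [List.foldl_cons, List.foldl_cons]
      match row with
      | [] => exact ih d g hrel hd hg
      | [name] => exact ih d g hrel hd hg
      | name :: part :: rest =>
        show RelAG (sl.foldl _ (d.insert name (innerLoopA (d.getD name PySem.Dict.empty) (part :: rest))))
             (sl.foldl _ (g.insert name (g.getD name [] ++ [part :: rest])))
        have hkeys : d.keys = g.keys := rel_keys d g hrel
        have hcont : d.contains name = g.contains name := by
          rw [PySem.Dict.contains_eq_decide_mem_keys, PySem.Dict.contains_eq_decide_mem_keys, hkeys]
        by_cases hc : g.contains name = true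
        · -- event already present: both dicts overwrite in place
          have hdc : d.contains name = true := by rw [hcont]; exact hc
          have hsome : (g.get? name).isSome := by
            rw [← PySem.Dict.contains_eq_isSome_get? g name]; exact hc
          obtain ⟨rows, hrows⟩ := Option.isSome_iff_exists.mp hsome
          have hrowsmem : (name, rows) ∈ g.items := PySem.Dict.mem_items_of_get?_eq_some g hrows
          have hmapped : (name, colMax rows) ∈ g.items.map (fun p => (p.1, colMax p.2)) :=
            List.mem_map.mpr ⟨(name, rows), hrowsmem, rfl⟩
          rw [← hrel] at hmapped
          obtain ⟨pd, hpdmem, hpdeq⟩ := List.mem_map.mp hmapped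
          have hpd1 : pd.1 = name := congrArg Prod.fst hpdeq
          have hpditems : pd.2.items = colMax rows := congrArg Prod.snd hpdeq
          have hpdmem' : (name, pd.2) ∈ d.items := by rw [← hpd1]; exact hpdmem
          have hget : d.get? name = some pd.2 :=
            (PySem.Dict.get?_eq_some_iff_mem_items d name pd.2 hd).mpr hpdmem'
          have hgetD : d.getD name PySem.Dict.empty = pd.2 :=
            PySem.Dict.getD_of_get?_eq_some d _ hget
          have hgetDg : g.getD name [] = rows := PySem.Dict.getD_of_get?_eq_some g _ hrows
          apply ih
          · unfold RelAG
            rw [PySem.Dict.items_insert_of_contains d _ hdc,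
                PySem.Dict.items_insert_of_contains g _ hc, hgetD, hgetDg]
            exact rel_replace d.items g.items hrel name _ _
              (step_value pd.2 rows (part :: rest) hpditems)
          · rw [PySem.Dict.keys_insert_of_contains d _ hdc]; exact hd
          · rw [PySem.Dict.keys_insert_of_contains g _ hc]; exact hg
        · -- fresh event: both dicts append at the end
          have hcf : g.contains name = false := by simpa using hc
          have hdc : d.contains name = false := by rw [hcont]; exact hcf
          have hgetD : d.getD name PySem.Dict.empty = PySem.Dict.empty :=
            PySem.Dict.getD_of_not_contains d _ hdc
          have hgetDg : g.getD name [] = [] := PySem.Dict.getD_of_not_contains g _ hcf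
          have hnmem : name ∉ d.keys := by
            have h2 := PySem.Dict.contains_eq_decide_mem_keys d name
            rw [hdc] at h2
            exact of_decide_eq_false h2.symm
          have hnmemg : name ∉ g.keys := hkeys ▸ hnmem
          have hval : (innerLoopA (PySem.Dict.empty : PySem.Dict Int Int) (part :: rest)).items
              = colMax ([] ++ [part :: rest]) :=
            step_value PySem.Dict.empty [] (part :: rest) rfl
          apply ih
          · unfold RelAG
            rw [PySem.Dict.items_insert_of_not_contains d _ hdc,
                PySem.Dict.items_insert_of_not_contains g _ hcf, hgetD, hgetDg]
            rw [List.map_append, List.map_append, hrel]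
            simp only [List.map_cons, List.map_nil, List.nil_append]
            rw [hval, List.nil_append]
          · rw [PySem.Dict.keys_insert_of_not_contains d _ hdc]
            simp [List.nodup_append, hd]
            exact fun a ha h => hnmem (h ▸ ha)
          · rw [PySem.Dict.keys_insert_of_not_contains g _ hcf]
            simp [List.nodup_append, hg]
            exact fun a ha h => hnmemg (h ▸ ha)

-- ===== VERDICT (by name: the statement is the Claim_ definition above) =====
theorem get_paddings_spec : Claim_equal_get_paddings := by
  intro sl _ _
  unfold Spec_get_paddings get_paddings get_paddings_alt
  exact main_invariant sl PySem.Dict.empty PySem.Dict.empty rfl (by simp) (by simp)
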